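-- pv_equiv track=rewrite | github.com/haritondan/AA-Labs | Lab6/main.py | spigot
-- ===== SOURCE A (Python) =====
-- def spigot(n):
--     digits = [2]
--     for i in range(1, n+1):
--         carry = 0
--         for j in reversed(range(len(digits))):
--             num = 10 * digits[j] + carry
--             digits[j] = num // (2*i - 1)
--             carry = num % (2*i - 1)
--         while carry > 0:
--             digits.insert(0, carry % 10)
--             carry //= 10
--     return digits[-1]
-- ===== SOURCE B (Python) =====
-- def spigot(n):
--     # The last digit slot is the first processed each pass (carry is reset there),
--     # so it evolves independently: d -> (10*d) // (2*i - 1).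
--     d = 2
--     for i in range(1, n + 1):
--         d = (10 * d) // (2 * i - 1)
--     return d
-- ===== Notes on version B (the rewrite author's own statement) =====
-- stated objective: faster
-- what changed: B tracks only the last array slot (the one A returns), which A's right-to-left pass updates first with a fresh carry, so one scalar recurrence d=(10*d)//(2i-1) replaces the whole growing digit array.
import Mathlib
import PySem

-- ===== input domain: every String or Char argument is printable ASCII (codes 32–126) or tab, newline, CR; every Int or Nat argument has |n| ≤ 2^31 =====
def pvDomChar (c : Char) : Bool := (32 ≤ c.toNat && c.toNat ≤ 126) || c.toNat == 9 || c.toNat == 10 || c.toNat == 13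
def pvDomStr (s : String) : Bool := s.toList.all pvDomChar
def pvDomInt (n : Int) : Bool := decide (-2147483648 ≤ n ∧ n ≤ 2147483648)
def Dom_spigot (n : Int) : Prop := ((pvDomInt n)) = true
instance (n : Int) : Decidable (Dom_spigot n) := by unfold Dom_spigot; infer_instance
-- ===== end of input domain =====

-- B tracks only the last array slot (the one A returns), which A's right-to-left pass
-- updates first with a fresh carry, so one scalar recurrence replaces A's whole digit array (faster).

-- ===== PORT A =====
-- the inner 'for j in reversed(range(len(digits)))' pass: carry enters at the rightmost
-- element and flows left, so the head is processed last
def pvStepRev (w : Int) : List Int → Int → List Int × Int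
  | [], c => ([], c)
  | d :: rest, c =>
    let p := pvStepRev w rest c
    let num := 10 * d + p.2
    (PySem.Int.floordiv num w :: p.1, PySem.Int.mod num w)

-- the 'while carry > 0: digits.insert(0, carry % 10); carry //= 10' loop
def pvPushCarry (c : Int) (digits : List Int) : List Int :=
  if 0 < c then pvPushCarry (PySem.Int.floordiv c 10) (PySem.Int.mod c 10 :: digits)
  else digits
termination_by c.toNat
decreasing_by
  rw [PySem.Int.floordiv_eq_ediv_of_pos (by norm_num)]
  omega

def spigot (n : Int) : Int :=
  let digits := (PySem.List.pyRange 1 (n + 1) 1).foldl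
    (fun digits i =>
      let p := pvStepRev (2 * i - 1) digits 0
      pvPushCarry p.2 p.1) [2]
  -- digits starts as [2] and never shrinks, so pyGet? is always 'some' (digits[-1] cannot raise)
  (PySem.List.pyGet? digits (-1)).getD 0

-- ===== PORT B =====
def spigot_alt (n : Int) : Int :=
  (PySem.List.pyRange 1 (n + 1) 1).foldl
    (fun d i => PySem.Int.floordiv (10 * d) (2 * i - 1)) 2

-- ===== PRECONDITION & SPEC =====
def Spec_spigot (n : Int) (out : Int) : Prop := out = spigot_alt n
instance (n : Int) (out : Int) : Decidable (Spec_spigot n out) := by unfold Spec_spigot; infer_instance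

-- ===== CLAIM (what is proved, stated in full; the proofs are below) =====
def Claim_equal_spigot : Prop := ∀ (n : Int), Dom_spigot n → Spec_spigot n (spigot n)

-- ===== LEMMAS AND PROOFS =====

theorem pvStepRev_append (w d c : Int) (l : List Int) :
    pvStepRev w (l ++ [d]) c =
      ((pvStepRev w l (PySem.Int.mod (10 * d + c) w)).1 ++
        [PySem.Int.floordiv (10 * d + c) w],
       (pvStepRev w l (PySem.Int.mod (10 * d + c) w)).2) := by
  induction l with
  | nil => simp [pvStepRev]
  | cons x xs ih => simp [pvStepRev, ih]

theorem pvStepRev_getLast? (w d : Int) (l : List Int) (h : l.getLast? = some d) :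
    (pvStepRev w l 0).1.getLast? = some (PySem.Int.floordiv (10 * d) w) := by
  obtain ⟨l', rfl⟩ : ∃ l', l = l' ++ [d] := by
    rcases List.getLast?_eq_some_iff.mp h with ⟨l', hl⟩
    exact ⟨l', hl⟩
  rw [pvStepRev_append]
  simp

theorem pvPushCarry_getLast? (c : Int) (l : List Int) (d : Int)
    (h : l.getLast? = some d) : (pvPushCarry c l).getLast? = some d := by
  fun_induction pvPushCarry c l with
  | case1 c l hc ih =>
      exact ih (by cases l <;> simp_all)
  | case2 => exact h

theorem pvFold_getLast? (lst : List Int) :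
    ∀ (digits : List Int) (d : Int), digits.getLast? = some d →
      (lst.foldl (fun digits i =>
          let p := pvStepRev (2 * i - 1) digits 0
          pvPushCarry p.2 p.1) digits).getLast? =
        some (lst.foldl (fun d i => PySem.Int.floordiv (10 * d) (2 * i - 1)) d) := by
  induction lst with
  | nil => intro digits d h; simpa using h
  | cons i rest ih =>
      intro digits d h
      simp only [List.foldl_cons]
      exact ih _ _ (pvPushCarry_getLast? _ _ _ (pvStepRev_getLast? _ _ _ h))

-- ===== VERDICT (by name: the statement is the Claim_ definition above) =====
theorem spigot_spec : Claim_equal_spigot := by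
  intro n _
  unfold Spec_spigot spigot spigot_alt
  have h := pvFold_getLast? (PySem.List.pyRange 1 (n + 1) 1) [2] 2 (by simp)
  simp only [PySem.List.pyGet?_neg_one, h, Option.getD_some]
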